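-- pv_equiv track=rewrite | github.com/chtranview/yaml_pipeline_explainer | runtime/executor.py | _gamma_local
-- ===== SOURCE A (Python) =====
-- def _gamma_local(handout_content: str) -> str:
--     """Route B：從講義 MD 擷取標題與重點，組成投影片骨架。"""
--     slides: list[str] = []
--     current_h1 = ""
--     current_points: list[str] = []
--
--     for line in handout_content.splitlines():
--         stripped = line.strip()
--         if stripped.startswith("# "):
--             current_h1 = stripped[2:].strip()
--         elif stripped.startswith("## "):
--             # 新 section → flush previous
--             if current_points:
--                 slides.append("\n".join(current_points))
--                 current_points = []
--             section_title = stripped[3:].strip()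
--             current_points.append(f"## {section_title}")
--         elif stripped.startswith("### "):
--             current_points.append(f"- **{stripped[4:].strip()}**")
--         elif stripped.startswith("- ") and len(current_points) < 6:
--             current_points.append(stripped)
--
--     if current_points:
--         slides.append("\n".join(current_points))
--
--     if current_h1:
--         slides.insert(0, f"## {current_h1}\n")
--     return "\n\n".join(slides)
-- ===== SOURCE B (Python) =====
-- def _gamma_local(handout_content: str) -> str:
--     """Route B: two-phase rewrite — strip & segment the lines first, then render each segment."""
--     lines = [line.strip() for line in handout_content.splitlines()]
--
--     current_h1 = ""
--     for s in lines:
--         if s.startswith("# "):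
--             current_h1 = s[2:].strip()
--
--     segments = []
--     cur = []
--     for s in lines:
--         if s.startswith("## "):
--             segments.append(cur)
--             cur = [s]
--         elif not s.startswith("# "):
--             cur.append(s)
--     segments.append(cur)
--
--     def points_of(seg):
--         pts = []
--         for s in seg:
--             if s.startswith("## "):
--                 pts.append("## " + s[3:].strip())
--             elif s.startswith("### "):
--                 pts.append("- **" + s[4:].strip() + "**")
--             elif s.startswith("- ") and len(pts) < 6:
--                 pts.append(s)
--         return pts
--
--     slides = ["\n".join(pts) for pts in map(points_of, segments) if pts]
--     if current_h1:
--         slides.insert(0, "## " + current_h1 + "\n")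
--     return "\n\n".join(slides)
-- ===== Notes on version B (the rewrite author's own statement) =====
-- stated objective: alternative
-- what changed: A's single stateful loop (flushing accumulated points at each H2-heading boundary) is replaced by a two-phase decomposition: strip the lines, scan once for the last H1 heading, split the lines into segments at H2-heading boundaries, then render each segment independently and filter out empty ones.
import Mathlib
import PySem

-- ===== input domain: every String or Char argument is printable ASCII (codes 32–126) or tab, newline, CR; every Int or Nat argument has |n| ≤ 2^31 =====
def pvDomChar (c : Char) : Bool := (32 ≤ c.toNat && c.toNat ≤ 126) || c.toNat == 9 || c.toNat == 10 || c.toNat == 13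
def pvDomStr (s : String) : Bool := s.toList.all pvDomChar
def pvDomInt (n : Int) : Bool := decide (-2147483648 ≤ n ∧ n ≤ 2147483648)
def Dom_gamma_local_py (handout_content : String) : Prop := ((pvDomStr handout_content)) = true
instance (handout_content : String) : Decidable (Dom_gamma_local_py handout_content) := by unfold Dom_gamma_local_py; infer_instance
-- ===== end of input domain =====

-- B replaces A's single stateful flush-on-boundary loop by a two-phase decomposition
-- (segment the stripped lines at H2-heading boundaries, then render each segment independently); same cost, clearer structure.

-- ===== PORT A =====
-- A's for-loop over splitlines with state (slides, current_h1, current_points)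
def aLoop : List String → List String → String → List String → List String × String × List String
  | [], slides, h1, pts => (slides, h1, pts)
  | line :: rest, slides, h1, pts =>
    let stripped := PySem.Str.strip line
    if PySem.Str.startswith stripped "# " then
      aLoop rest slides (PySem.Str.strip (PySem.Str.slice stripped (some 2) none)) pts
    else if PySem.Str.startswith stripped "## " then
      let slides' := if pts ≠ [] then slides ++ [PySem.Str.join "\n" pts] else slides
      aLoop rest slides' h1 ["## " ++ PySem.Str.strip (PySem.Str.slice stripped (some 3) none)]
    else if PySem.Str.startswith stripped "### " then
      aLoop rest slides h1 (pts ++ ["- **" ++ PySem.Str.strip (PySem.Str.slice stripped (some 4) none) ++ "**"])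
    else if PySem.Str.startswith stripped "- " ∧ pts.length < 6 then
      aLoop rest slides h1 (pts ++ [stripped])
    else
      aLoop rest slides h1 pts

def gamma_local_py (handout_content : String) : String :=
  let r := aLoop (PySem.Str.splitlines handout_content) [] "" []
  let slides := if r.2.2 ≠ [] then r.1 ++ [PySem.Str.join "\n" r.2.2] else r.1
  let slides2 := if r.2.1 ≠ "" then ("## " ++ r.2.1 ++ "\n") :: slides else slides
  PySem.Str.join "\n\n" slides2

-- ===== PORT B =====
-- Source B: the h1 pass (last H1 heading wins)
def bH1Step (h : String) (s : String) : String :=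
  if PySem.Str.startswith s "# " then PySem.Str.strip (PySem.Str.slice s (some 2) none) else h

-- Source B: the segmentation pass (new segment at each H2 line; H1 lines dropped)
def bSeg : List String → List (List String) → List String → List (List String)
  | [], segs, cur => segs ++ [cur]
  | s :: rest, segs, cur =>
    if PySem.Str.startswith s "## " then bSeg rest (segs ++ [cur]) [s]
    else if !PySem.Str.startswith s "# " then bSeg rest segs (cur ++ [s])
    else bSeg rest segs cur

-- Source B: points_of — one step of its pts loop, folded over the segment
def bPointStep (pts : List String) (s : String) : List String :=
  if PySem.Str.startswith s "## " then pts ++ ["## " ++ PySem.Str.strip (PySem.Str.slice s (some 3) none)]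
  else if PySem.Str.startswith s "### " then pts ++ ["- **" ++ PySem.Str.strip (PySem.Str.slice s (some 4) none) ++ "**"]
  else if PySem.Str.startswith s "- " ∧ pts.length < 6 then pts ++ [s]
  else pts

def bPoints (seg : List String) : List String := seg.foldl bPointStep []

def gamma_local_py_alt (handout_content : String) : String :=
  let lines := (PySem.Str.splitlines handout_content).map PySem.Str.strip
  let h1 := lines.foldl bH1Step ""
  let segs := bSeg lines [] []
  let slides := ((segs.map bPoints).filter (fun p => !p.isEmpty)).map (PySem.Str.join "\n")
  let slides2 := if h1 ≠ "" then ("## " ++ h1 ++ "\n") :: slides else slides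
  PySem.Str.join "\n\n" slides2

-- ===== PRECONDITION & SPEC =====
def Spec_gamma_local_py (handout_content : String) (out : String) : Prop := out = gamma_local_py_alt handout_content
instance (handout_content : String) (out : String) : Decidable (Spec_gamma_local_py handout_content out) := by unfold Spec_gamma_local_py; infer_instance

-- ===== CLAIM (what is proved, stated in full; the proofs are below) =====
def Claim_equal_gamma_local_py : Prop := ∀ (handout_content : String), Dom_gamma_local_py handout_content → Spec_gamma_local_py handout_content (gamma_local_py handout_content)

-- ===== LEMMAS AND PROOFS =====

-- the four markdown prefixes are mutually exclusive
-- a line starting with the shorter prefix p cannot also start with q when p is not a prefix of q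
theorem pvSW_false {s p q : String} (hp : PySem.Str.startswith s p = true)
    (hlen : p.toList.length ≤ q.toList.length) (hnp : ¬ (p.toList <+: q.toList)) :
    PySem.Str.startswith s q = false := by
  rw [← Bool.not_eq_true]
  intro hq
  simp only [PySem.Str.startswith_eq] at hp hq
  rw [PySem.Chars.startswith_iff] at hp hq
  exact hnp (List.prefix_of_prefix_length_le hp hq hlen)

theorem pvSeg_accum (lines : List String) : ∀ (segs : List (List String)) (cur : List String),
    bSeg lines segs cur = segs ++ bSeg lines [] cur := by
  induction lines with
  | nil => intro segs cur; simp [bSeg]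
  | cons s rest ih =>
    intro segs cur
    simp only [bSeg]
    split_ifs with h2 h1
    · rw [ih (segs ++ [cur]) [s], ih ([] ++ [cur]) [s]]
      simp
    · rw [ih segs (cur ++ [s]), ih [] (cur ++ [s])]
    · rw [ih segs cur]

theorem bPoints_snoc (cur : List String) (s : String) :
    bPoints (cur ++ [s]) = bPointStep (bPoints cur) s := by
  simp [bPoints, List.foldl_append]

def pvFinalize (r : List String × String × List String) : List String :=
  if r.2.2 ≠ [] then r.1 ++ [PySem.Str.join "\n" r.2.2] else r.1

theorem pvH1 (lines : List String) : ∀ (slides : List String) (h1 : String) (pts : List String),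
    (aLoop lines slides h1 pts).2.1 = (lines.map PySem.Str.strip).foldl bH1Step h1 := by
  induction lines with
  | nil => intro slides h1 pts; simp [aLoop]
  | cons line rest ih =>
    intro slides h1 pts
    simp only [aLoop, List.map_cons, List.foldl_cons, bH1Step]
    split_ifs <;> exact ih _ _ _

theorem pvMain (lines : List String) : ∀ (slides : List String) (h1 : String) (cur : List String),
    pvFinalize (aLoop lines slides h1 (bPoints cur))
      = slides ++ (((bSeg (lines.map PySem.Str.strip) [] cur).map bPoints).filter
          (fun p => !p.isEmpty)).map (PySem.Str.join "\n") := by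
  induction lines with
  | nil =>
    intro slides h1 cur
    simp only [aLoop, pvFinalize, List.map_nil, bSeg, List.map_cons, List.filter, List.nil_append]
    by_cases h : bPoints cur = []
    · simp [h]
    · have hne : (bPoints cur).isEmpty = false := by simpa using h
      simp [h, hne]
  | cons line rest ih =>
    intro slides h1 cur
    simp only [aLoop, List.map_cons]
    split_ifs with hA hB hP hC hD
    · -- H1 heading: A updates h1, B's segmentation drops the line
      have hA' : PySem.Chars.startswith (PySem.Chars.strip line.toList) ['#', ' '] = true := by
        simpa using hA
      have h2 : PySem.Chars.startswith (PySem.Chars.strip line.toList) ['#', '#', ' '] = false := by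
        simpa using pvSW_false hA (q := "## ") (by decide) (by decide)
      have e : bSeg (PySem.Str.strip line :: List.map PySem.Str.strip rest) [] cur
          = bSeg (List.map PySem.Str.strip rest) [] cur := by
        simp [bSeg, h2, hA']
      rw [e]
      exact ih _ _ _
    · -- H2 heading, nonempty points: A flushes them, B keeps segment cur and starts a new one
      have hB' : PySem.Chars.startswith (PySem.Chars.strip line.toList) ['#', '#', ' '] = true := by
        simpa using hB
      have hnew : ["## " ++ PySem.Str.strip (PySem.Str.slice (PySem.Str.strip line) (some 3) none)]
          = bPoints [PySem.Str.strip line] := by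
        simp [bPoints, bPointStep, hB']
      have e : bSeg (PySem.Str.strip line :: List.map PySem.Str.strip rest) [] cur
          = [cur] ++ bSeg (List.map PySem.Str.strip rest) [] [PySem.Str.strip line] := by
        simp only [bSeg]
        rw [if_pos hB, pvSeg_accum (List.map PySem.Str.strip rest) ([] ++ [cur]) [PySem.Str.strip line]]
        simp
      rw [hnew, ih, e]
      have hne : (bPoints cur).isEmpty = false := by simpa using hP
      simp [hne]
    · -- H2 heading, empty points: A flushes nothing, B's segment cur is filtered out
      have hB' : PySem.Chars.startswith (PySem.Chars.strip line.toList) ['#', '#', ' '] = true := by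
        simpa using hB
      have hnew : ["## " ++ PySem.Str.strip (PySem.Str.slice (PySem.Str.strip line) (some 3) none)]
          = bPoints [PySem.Str.strip line] := by
        simp [bPoints, bPointStep, hB']
      have e : bSeg (PySem.Str.strip line :: List.map PySem.Str.strip rest) [] cur
          = [cur] ++ bSeg (List.map PySem.Str.strip rest) [] [PySem.Str.strip line] := by
        simp only [bSeg]
        rw [if_pos hB, pvSeg_accum (List.map PySem.Str.strip rest) ([] ++ [cur]) [PySem.Str.strip line]]
        simp
      rw [hnew, ih, e]
      have hcur : bPoints cur = [] := by simpa using hP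
      simp [hcur]
    · -- H3 line: both append the bold point
      have hB' : PySem.Chars.startswith (PySem.Chars.strip line.toList) ['#', '#', ' '] = false := by
        simpa using hB
      have hA' : PySem.Chars.startswith (PySem.Chars.strip line.toList) ['#', ' '] = false := by
        simpa using hA
      have hC' : PySem.Chars.startswith (PySem.Chars.strip line.toList) ['#', '#', '#', ' '] = true := by
        simpa using hC
      have hstep : bPoints cur ++ ["- **" ++ PySem.Str.strip (PySem.Str.slice (PySem.Str.strip line) (some 4) none) ++ "**"]
          = bPoints (cur ++ [PySem.Str.strip line]) := by
        rw [bPoints_snoc]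
        simp [bPointStep, hB', hC']
      have e : bSeg (PySem.Str.strip line :: List.map PySem.Str.strip rest) [] cur
          = bSeg (List.map PySem.Str.strip rest) [] (cur ++ [PySem.Str.strip line]) := by
        simp [bSeg, hB', hA']
      rw [hstep, e]
      exact ih _ _ _
    · -- bullet line under the cap: both append it
      have hB' : PySem.Chars.startswith (PySem.Chars.strip line.toList) ['#', '#', ' '] = false := by
        simpa using hB
      have hA' : PySem.Chars.startswith (PySem.Chars.strip line.toList) ['#', ' '] = false := by
        simpa using hA
      have hC' : PySem.Chars.startswith (PySem.Chars.strip line.toList) ['#', '#', '#', ' '] = false := by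
        simpa using hC
      have hD' : PySem.Chars.startswith (PySem.Chars.strip line.toList) ['-', ' '] = true := by
        simpa using hD.1
      have hstep : bPoints cur ++ [PySem.Str.strip line] = bPoints (cur ++ [PySem.Str.strip line]) := by
        rw [bPoints_snoc]
        simp [bPointStep, hB', hC', hD', hD.2]
      have e : bSeg (PySem.Str.strip line :: List.map PySem.Str.strip rest) [] cur
          = bSeg (List.map PySem.Str.strip rest) [] (cur ++ [PySem.Str.strip line]) := by
        simp [bSeg, hB', hA']
      rw [hstep, e]
      exact ih _ _ _
    · -- any other line: A skips it, B stores it in cur but points_of ignores it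
      have hB' : PySem.Chars.startswith (PySem.Chars.strip line.toList) ['#', '#', ' '] = false := by
        simpa using hB
      have hA' : PySem.Chars.startswith (PySem.Chars.strip line.toList) ['#', ' '] = false := by
        simpa using hA
      have hC' : PySem.Chars.startswith (PySem.Chars.strip line.toList) ['#', '#', '#', ' '] = false := by
        simpa using hC
      have hD' : ¬ (PySem.Chars.startswith (PySem.Chars.strip line.toList) ['-', ' '] = true
          ∧ (bPoints cur).length < 6) := by simpa using hD
      have hstep : bPoints cur = bPoints (cur ++ [PySem.Str.strip line]) := by
        rw [bPoints_snoc]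
        simp [bPointStep, hB', hC', hD']
      have e : bSeg (PySem.Str.strip line :: List.map PySem.Str.strip rest) [] cur
          = bSeg (List.map PySem.Str.strip rest) [] (cur ++ [PySem.Str.strip line]) := by
        simp [bSeg, hB', hA']
      rw [hstep, e]
      exact ih _ _ _

-- ===== VERDICT (by name: the statement is the Claim_ definition above) =====
theorem gamma_local_py_spec : Claim_equal_gamma_local_py := by
  intro s _
  unfold Spec_gamma_local_py gamma_local_py gamma_local_py_alt
  have hmain := pvMain (PySem.Str.splitlines s) [] "" []
  have hh1 := pvH1 (PySem.Str.splitlines s) [] "" []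
  simp only [bPoints, List.foldl_nil] at hmain
  simp only [pvFinalize, List.nil_append] at hmain
  simp only [] at hmain hh1 ⊢
  rw [hmain, hh1]
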